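-- pv_equiv track=rewrite | github.com/Bentenopala/Advent-of-Code-2022 | day08.py | create_vis_dict
-- ===== SOURCE A (Python) =====
-- def create_score_dict(m,n):
--     sco = dict()
--     for i in range(0,m):
--         sco[i] = dict()
--         for j in range(0,n):
--             sco[i].update({j: {"n": 0, "s": 0, "w": 0, "e": 0,}})
--     return sco
--
-- def create_vis_dict(m,n):
--     vis = create_score_dict(m,n)
--     for i in range(0,m):
--         for j in range(0,n):
--             if i == 0:
--                 vis[i].update({j: {"n": 1}})
--             elif i == m-1:
--                 vis[i].update({j: {"s": 1}})
--             elif j == 0: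
--                 vis[i].update({j: {"w": 1}})
--             elif j == m-1:
--                 vis[i].update({j: {"e": 1}})
--     return vis
-- ===== SOURCE B (Python) =====
-- def create_vis_dict(m, n):
--     def cell(i, j):
--         if i == 0:
--             return {"n": 1}
--         if i == m - 1:
--             return {"s": 1}
--         if j == 0:
--             return {"w": 1}
--         if j == m - 1:
--             return {"e": 1}
--         return {"n": 0, "s": 0, "w": 0, "e": 0}
--     return {i: {j: cell(i, j) for j in range(n)} for i in range(m)}
-- ===== Notes on version B (the rewrite author's own statement) =====
-- stated objective: simpler
-- what changed: Replaces the build-everything-then-overwrite-borders double sweep (create_score_dict plus a second mutation pass) with a single dict comprehension that computes each cell's final value directly via one cell(i,j) ladder (keeping A's literal j == m-1 comparison).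
import Mathlib
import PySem

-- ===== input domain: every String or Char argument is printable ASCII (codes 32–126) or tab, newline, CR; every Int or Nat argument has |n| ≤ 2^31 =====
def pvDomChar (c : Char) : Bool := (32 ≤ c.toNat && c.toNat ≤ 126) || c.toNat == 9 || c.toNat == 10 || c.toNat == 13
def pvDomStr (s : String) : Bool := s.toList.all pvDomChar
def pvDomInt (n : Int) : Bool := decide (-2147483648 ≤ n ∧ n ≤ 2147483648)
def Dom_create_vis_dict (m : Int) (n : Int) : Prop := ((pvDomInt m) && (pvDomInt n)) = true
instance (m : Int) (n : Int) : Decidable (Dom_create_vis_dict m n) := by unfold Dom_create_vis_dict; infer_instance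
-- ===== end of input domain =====

-- B builds each cell's final value directly in one pass (same if-ladder, including A's literal j == m-1
-- comparison), instead of A's all-zeros build followed by a border-overwrite sweep; objective: simpler.

-- ===== PORT A =====
def pvBase : PySem.Dict String Int := PySem.Dict.ofList [("n", 0), ("s", 0), ("w", 0), ("e", 0)]

def create_score_dict (m : Int) (n : Int) :
    PySem.Dict Int (PySem.Dict Int (PySem.Dict String Int)) :=
  (PySem.List.pyRange 0 m 1).foldl
    (fun sco i =>
      (PySem.List.pyRange 0 n 1).foldl
        (fun sco j => sco.modify i PySem.Dict.empty (fun r => r.insert j pvBase))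
        (sco.insert i PySem.Dict.empty))
    PySem.Dict.empty

def pvVisLoop (m : Int) (n : Int) :
    PySem.Dict Int (PySem.Dict Int (PySem.Dict String Int)) :=
  (PySem.List.pyRange 0 m 1).foldl
    (fun vis i =>
      (PySem.List.pyRange 0 n 1).foldl
        (fun vis j =>
          if i = 0 then vis.modify i PySem.Dict.empty (fun r => r.insert j (PySem.Dict.ofList [("n", 1)]))
          else if i = m - 1 then vis.modify i PySem.Dict.empty (fun r => r.insert j (PySem.Dict.ofList [("s", 1)]))
          else if j = 0 then vis.modify i PySem.Dict.empty (fun r => r.insert j (PySem.Dict.ofList [("w", 1)]))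
          else if j = m - 1 then vis.modify i PySem.Dict.empty (fun r => r.insert j (PySem.Dict.ofList [("e", 1)]))
          else vis)
        vis)
    (create_score_dict m n)

def create_vis_dict (m : Int) (n : Int) : List (Int × List (Int × List (String × Int))) :=
  (pvVisLoop m n).items.map (fun p => (p.1, p.2.items.map (fun q => (q.1, q.2.items))))

-- ===== PORT B =====
def pvCell (m : Int) (i : Int) (j : Int) : PySem.Dict String Int :=
  if i = 0 then PySem.Dict.ofList [("n", 1)]
  else if i = m - 1 then PySem.Dict.ofList [("s", 1)]
  else if j = 0 then PySem.Dict.ofList [("w", 1)]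
  else if j = m - 1 then PySem.Dict.ofList [("e", 1)]
  else PySem.Dict.ofList [("n", 0), ("s", 0), ("w", 0), ("e", 0)]

def create_vis_dict_alt (m : Int) (n : Int) : List (Int × List (Int × List (String × Int))) :=
  (PySem.List.pyRange 0 m 1).map
    (fun i => (i, (PySem.List.pyRange 0 n 1).map (fun j => (j, (pvCell m i j).items))))

-- ===== PRECONDITION & SPEC =====
def Spec_create_vis_dict (m : Int) (n : Int) (out : List (Int × List (Int × List (String × Int)))) : Prop := out = create_vis_dict_alt m n
instance (m : Int) (n : Int) (out : List (Int × List (Int × List (String × Int)))) : Decidable (Spec_create_vis_dict m n out) := by unfold Spec_create_vis_dict; infer_instance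

-- ===== CLAIM (what is proved, stated in full; the proofs are below) =====
def Claim_equal_create_vis_dict : Prop := ∀ (m : Int) (n : Int), Dom_create_vis_dict m n → Spec_create_vis_dict m n (create_vis_dict m n)

-- ===== LEMMAS AND PROOFS =====

-- the body of A's second (overwrite) sweep, named so the proofs can speak about it
def pvVisBody (m i : Int) (vis : PySem.Dict Int (PySem.Dict Int (PySem.Dict String Int))) (j : Int) :
    PySem.Dict Int (PySem.Dict Int (PySem.Dict String Int)) :=
  if i = 0 then vis.modify i PySem.Dict.empty (fun r => r.insert j (PySem.Dict.ofList [("n", 1)]))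
  else if i = m - 1 then vis.modify i PySem.Dict.empty (fun r => r.insert j (PySem.Dict.ofList [("s", 1)]))
  else if j = 0 then vis.modify i PySem.Dict.empty (fun r => r.insert j (PySem.Dict.ofList [("w", 1)]))
  else if j = m - 1 then vis.modify i PySem.Dict.empty (fun r => r.insert j (PySem.Dict.ofList [("e", 1)]))
  else vis

-- the same sweep step acting on a single row
def pvRowStep (m i : Int) (r : PySem.Dict Int (PySem.Dict String Int)) (j : Int) :
    PySem.Dict Int (PySem.Dict String Int) :=
  if i = 0 then r.insert j (PySem.Dict.ofList [("n", 1)])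
  else if i = m - 1 then r.insert j (PySem.Dict.ofList [("s", 1)])
  else if j = 0 then r.insert j (PySem.Dict.ofList [("w", 1)])
  else if j = m - 1 then r.insert j (PySem.Dict.ofList [("e", 1)])
  else r

-- what the sweep writes into cell (i, j), if anything
def pvGIn (m i j : Int) : Option (PySem.Dict String Int) :=
  if i = 0 then some (PySem.Dict.ofList [("n", 1)])
  else if i = m - 1 then some (PySem.Dict.ofList [("s", 1)])
  else if j = 0 then some (PySem.Dict.ofList [("w", 1)])
  else if j = m - 1 then some (PySem.Dict.ofList [("e", 1)])
  else none

-- the all-zero row A's first pass builds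
def pvRow0 (n : Int) : PySem.Dict Int (PySem.Dict String Int) :=
  (PySem.List.pyRange 0 n 1).foldl (fun r j => r.insert j pvBase) PySem.Dict.empty

-- conditional-overwrite step shared by the collapse lemma and pvRowStep's match form
def pvMStep {ν : Type} (g : Int → Option ν) (r : PySem.Dict Int ν) (j : Int) : PySem.Dict Int ν :=
  match g j with
  | some w => r.insert j w
  | none => r

-- inserting at two distinct keys commutes when the second key is already present
theorem pv_insert_comm {ν : Type} (d : PySem.Dict Int ν) (k i : Int) (v w : ν)
    (hne : k ≠ i) (hi : d.contains i = true) :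
    (d.insert k v).insert i w = (d.insert i w).insert k v := by
  apply PySem.Dict.ext
  have hik : (d.insert k v).contains i = true := by
    simp [PySem.Dict.contains_insert, hi]
  have hci : (d.insert i w).contains k = d.contains k := by
    simp [PySem.Dict.contains_insert, hne]
  by_cases hk : d.contains k = true
  · rw [PySem.Dict.items_insert_of_contains _ _ hik,
        PySem.Dict.items_insert_of_contains _ _ hk,
        PySem.Dict.items_insert_of_contains _ _ (hci.trans hk),
        PySem.Dict.items_insert_of_contains _ _ hi]
    simp only [List.map_map]
    apply List.map_congr_left
    intro p _
    by_cases h1 : p.1 = k <;> by_cases h2 : p.1 = i <;>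
      simp_all [Function.comp, Ne.symm hne]
  · have hk' : d.contains k = false := by simpa using hk
    rw [PySem.Dict.items_insert_of_contains _ _ hik,
        PySem.Dict.items_insert_of_not_contains _ _ hk',
        PySem.Dict.items_insert_of_not_contains _ _ (hci.trans hk'),
        PySem.Dict.items_insert_of_contains _ _ hi]
    simp [hne]

theorem pv_modify_insert_self {ν : Type} (d : PySem.Dict Int ν) (i : Int) (r e : ν) (f : ν → ν) :
    (d.insert i r).modify i e f = d.insert i (f r) := by
  simp [PySem.Dict.modify, PySem.Dict.getD_insert_self, PySem.Dict.insert_insert_self]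

theorem pv_modify_insert_of_ne {ν : Type} (d : PySem.Dict Int ν) (x i : Int) (v e : ν) (f : ν → ν)
    (hne : x ≠ i) (hi : d.contains i = true) :
    (d.insert x v).modify i e f = (d.modify i e f).insert x v := by
  simp only [PySem.Dict.modify]
  rw [PySem.Dict.getD_insert_of_ne _ _ _ (Ne.symm hne)]
  exact pv_insert_comm d x i v _ hne hi

-- a modify at key i moves through a fold of inserts at other keys
theorem pv_fold_ins_modify {ν : Type} (t : List Int) (w : Int → ν) :
    ∀ (d : PySem.Dict Int ν) (i : Int), i ∉ t → d.contains i = true → ∀ (e : ν) (f : ν → ν),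
      (t.foldl (fun s x => s.insert x (w x)) d).modify i e f
        = t.foldl (fun s x => s.insert x (w x)) (d.modify i e f) := by
  induction t with
  | nil => intro d i _ _ e f; rfl
  | cons x t ih =>
    intro d i hni hi e f
    rw [List.mem_cons] at hni
    push Not at hni
    simp only [List.foldl_cons]
    rw [ih _ i hni.2 (by simp [PySem.Dict.contains_insert, hi]),
        pv_modify_insert_of_ne _ _ _ _ _ _ (Ne.symm hni.1) hi]

-- so does an insert at key i (already present)
theorem pv_fold_ins_insert {ν : Type} (t : List Int) (w : Int → ν) :
    ∀ (d : PySem.Dict Int ν) (i : Int), i ∉ t → d.contains i = true → ∀ (v : ν),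
      (t.foldl (fun s x => s.insert x (w x)) d).insert i v
        = t.foldl (fun s x => s.insert x (w x)) (d.insert i v) := by
  induction t with
  | nil => intro d i _ _ v; rfl
  | cons x t ih =>
    intro d i hni hi v
    rw [List.mem_cons] at hni
    push Not at hni
    simp only [List.foldl_cons]
    rw [ih _ i hni.2 (by simp [PySem.Dict.contains_insert, hi]),
        pv_insert_comm _ _ _ _ _ (Ne.symm hni.1) hi]

-- the whole overwrite sweep of row i moves through the score inserts at the other keys
theorem pv_vis_commute (m : Int) (lj : List Int) :
    ∀ (t : List Int) (w : Int → PySem.Dict Int (PySem.Dict String Int)) (d : PySem.Dict Int (PySem.Dict Int (PySem.Dict String Int))) (i : Int),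
      i ∉ t → d.contains i = true →
      lj.foldl (pvVisBody m i) (t.foldl (fun s x => s.insert x (w x)) d)
        = t.foldl (fun s x => s.insert x (w x)) (lj.foldl (pvVisBody m i) d) := by
  induction lj with
  | nil => intro t w d i _ _; rfl
  | cons j lj ih =>
    intro t w d i hni hi
    simp only [List.foldl_cons]
    have hstep : pvVisBody m i (t.foldl (fun s x => s.insert x (w x)) d) j
        = t.foldl (fun s x => s.insert x (w x)) (pvVisBody m i d j) := by
      unfold pvVisBody
      split_ifs <;> first
        | exact pv_fold_ins_modify t w d i hni hi _ _
        | rfl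
    have hcon : (pvVisBody m i d j).contains i = true := by
      unfold pvVisBody
      split_ifs <;> simp [PySem.Dict.contains_modify, hi]
    rw [hstep, ih t w (pvVisBody m i d j) i hni hcon]

-- A's first pass on one row, started right after `sco[i] = dict()`, is an insert of the zero row
theorem pv_score_inner (lj : List Int) :
    ∀ (d : PySem.Dict Int (PySem.Dict Int (PySem.Dict String Int))) (i : Int) (r : PySem.Dict Int (PySem.Dict String Int)),
      lj.foldl (fun s j => s.modify i PySem.Dict.empty (fun rr => rr.insert j pvBase)) (d.insert i r)
        = d.insert i (lj.foldl (fun rr j => rr.insert j pvBase) r) := by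
  induction lj with
  | nil => intro d i r; rfl
  | cons j lj ih =>
    intro d i r
    simp only [List.foldl_cons]
    rw [pv_modify_insert_self, ih]

-- hence A's first pass is a fold of plain inserts of the zero row
theorem pv_score_eq (lj : List Int) (li : List Int) :
    ∀ (d : PySem.Dict Int (PySem.Dict Int (PySem.Dict String Int))),
      li.foldl (fun sco i =>
          lj.foldl (fun sco j => sco.modify i PySem.Dict.empty (fun r => r.insert j pvBase))
            (sco.insert i PySem.Dict.empty)) d
        = li.foldl (fun s i =>
            s.insert i (lj.foldl (fun r j => r.insert j pvBase) PySem.Dict.empty)) d := by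
  induction li with
  | nil => intro d; rfl
  | cons i li ih =>
    intro d
    simp only [List.foldl_cons]
    rw [pv_score_inner, ih]

-- A's overwrite sweep of row i, started on a state ending with `insert i r`, acts on that row alone
theorem pv_vis_inner (m : Int) (lj : List Int) :
    ∀ (d : PySem.Dict Int (PySem.Dict Int (PySem.Dict String Int))) (i : Int) (r : PySem.Dict Int (PySem.Dict String Int)),
      lj.foldl (pvVisBody m i) (d.insert i r) = d.insert i (lj.foldl (pvRowStep m i) r) := by
  induction lj with
  | nil => intro d i r; rfl
  | cons j lj ih =>
    intro d i r
    simp only [List.foldl_cons]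
    have hstep : pvVisBody m i (d.insert i r) j = d.insert i (pvRowStep m i r j) := by
      unfold pvVisBody pvRowStep
      split_ifs <;> first | exact pv_modify_insert_self .. | rfl
    rw [hstep, ih]

-- main outer induction: building all rows then sweeping each equals inserting each finished row once
theorem pv_outer (m : Int) (lj : List Int) (r0 : PySem.Dict Int (PySem.Dict String Int)) :
    ∀ (li : List Int), li.Nodup → ∀ (d : PySem.Dict Int (PySem.Dict Int (PySem.Dict String Int))), (∀ i ∈ li, d.contains i = false) →
      li.foldl (fun vis i => lj.foldl (pvVisBody m i) vis)
          (li.foldl (fun s i => s.insert i r0) d)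
        = li.foldl (fun s i => s.insert i (lj.foldl (pvRowStep m i) r0)) d := by
  intro li
  induction li with
  | nil => intro _ d _; rfl
  | cons i t ih =>
    intro hnd d hfresh
    simp only [List.foldl_cons]
    have hit : i ∉ t := (List.nodup_cons.mp hnd).1
    have hci : (d.insert i r0).contains i = true := PySem.Dict.contains_insert_self ..
    rw [pv_vis_commute m lj t (fun _ => r0) (d.insert i r0) i hit hci,
        pv_vis_inner m lj d i r0,
        ih (List.nodup_cons.mp hnd).2 (d.insert i (lj.foldl (pvRowStep m i) r0))
          (by
            intro x hx
            have hxi : x ≠ i := fun h => hit (h ▸ hx)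
            simp [PySem.Dict.contains_insert, hxi, hfresh x (List.mem_cons_of_mem _ hx)])]

-- generic "insert all, then conditionally overwrite each in the same order" collapse
theorem pv_overwrite_collapse {ν : Type} (g : Int → Option ν) (v0 : ν) :
    ∀ (l : List Int), l.Nodup → ∀ (d : PySem.Dict Int ν), (∀ j ∈ l, d.contains j = false) →
      l.foldl (pvMStep g) (l.foldl (fun r j => r.insert j v0) d)
        = l.foldl (fun r j => r.insert j ((g j).getD v0)) d := by
  intro l
  induction l with
  | nil => intro _ d _; rfl
  | cons j t ih =>
    intro hnd d hfresh
    simp only [List.foldl_cons]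
    have hjt : j ∉ t := (List.nodup_cons.mp hnd).1
    have hcj : (d.insert j v0).contains j = true := PySem.Dict.contains_insert_self ..
    have hfresh' : ∀ w : ν, ∀ x ∈ t, ((d.insert j w).contains x) = false := by
      intro w x hx
      have hxj : x ≠ j := fun h => hjt (h ▸ hx)
      simp [PySem.Dict.contains_insert, hxj, hfresh x (List.mem_cons_of_mem _ hx)]
    cases hg : g j with
    | none =>
      simp only [pvMStep, hg, Option.getD_none]
      exact ih (List.nodup_cons.mp hnd).2 (d.insert j v0) (hfresh' v0)
    | some w =>
      simp only [pvMStep, hg, Option.getD_some]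
      rw [pv_fold_ins_insert t (fun _ => v0) (d.insert j v0) j hjt hcj w,
          PySem.Dict.insert_insert_self]
      exact ih (List.nodup_cons.mp hnd).2 (d.insert j w) (hfresh' w)

-- pvRowStep is the match form of pvGIn
theorem pv_rowstep_eq_match (m i : Int) :
    pvRowStep m i = pvMStep (pvGIn m i) := by
  funext r j
  simp only [pvRowStep, pvMStep, pvGIn]
  split_ifs <;> rfl

-- the final value of cell (i, j) is exactly B's cell ladder
theorem pv_cell_eq (m i j : Int) : (pvGIn m i j).getD pvBase = pvCell m i j := by
  unfold pvGIn pvCell pvBase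
  split_ifs <;> rfl

-- a fold of fresh inserts from empty has exactly the mapped items list
theorem pv_items_fold {ν : Type} (l : List Int) (hnd : l.Nodup) (V : Int → ν) :
    (l.foldl (fun s i => s.insert i (V i)) PySem.Dict.empty).items
      = l.map (fun i => (i, V i)) := by
  have h := PySem.Dict.items_foldl_insert_fresh (l := l) (k := fun i => i) (v := V)
    (d := PySem.Dict.empty) (by intro a _; exact PySem.Dict.contains_empty ..) (by simpa using hnd)
  simpa using h

-- ===== VERDICT (by name: the statement is the Claim_ definition above) =====
theorem create_vis_dict_spec : Claim_equal_create_vis_dict := by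
  intro m n _
  unfold Spec_create_vis_dict create_vis_dict create_vis_dict_alt
  have hli : (PySem.List.pyRange 0 m 1).Nodup := PySem.List.nodup_pyRange_one ..
  have hlj : (PySem.List.pyRange 0 n 1).Nodup := PySem.List.nodup_pyRange_one ..
  have hvis : pvVisLoop m n
      = (PySem.List.pyRange 0 m 1).foldl
          (fun s i => s.insert i
            ((PySem.List.pyRange 0 n 1).foldl (pvRowStep m i) (pvRow0 n)))
          PySem.Dict.empty := by
    show (PySem.List.pyRange 0 m 1).foldl
        (fun vis i => (PySem.List.pyRange 0 n 1).foldl (pvVisBody m i) vis)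
        (create_score_dict m n) = _
    have h0 : create_score_dict m n
        = (PySem.List.pyRange 0 m 1).foldl (fun s i => s.insert i (pvRow0 n))
            PySem.Dict.empty := pv_score_eq _ _ _
    rw [h0]
    exact pv_outer m _ _ _ hli PySem.Dict.empty
      (by intro i _; exact PySem.Dict.contains_empty ..)
  have hrow : ∀ i : Int,
      (PySem.List.pyRange 0 n 1).foldl (pvRowStep m i) (pvRow0 n)
        = (PySem.List.pyRange 0 n 1).foldl (fun r j => r.insert j (pvCell m i j))
            PySem.Dict.empty := by
    intro i
    rw [pv_rowstep_eq_match m i]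
    unfold pvRow0
    rw [pv_overwrite_collapse (pvGIn m i) pvBase _ hlj PySem.Dict.empty
        (by intro j _; exact PySem.Dict.contains_empty ..)]
    simp only [pv_cell_eq]
  rw [hvis]
  simp only [hrow]
  rw [pv_items_fold _ hli]
  simp only [List.map_map]
  apply List.map_congr_left
  intro i _
  simp only [Function.comp]
  rw [pv_items_fold _ hlj]
  simp [List.map_map, Function.comp]
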